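-- pv_equiv track=rewrite | github.com/agentculture/irc-lens | src/irc_lens/irc/message.py | _unescape_tag_value
-- ===== SOURCE A (Python) =====
-- _TAG_UNESCAPE = {
--     "\\:": ";",
--     "\\s": " ",
--     "\\\\": "\\",
--     "\\r": "\r",
--     "\\n": "\n",
-- }
--
-- def _unescape_tag_value(value: str) -> str:
--     out = []
--     i = 0
--     while i < len(value):
--         if value[i] == "\\" and i + 1 < len(value):
--             two = value[i : i + 2]
--             # Per IRCv3 spec, unknown escapes drop the backslash (yield only
--             # the second char). Known escapes map to their defined character.
--             out.append(_TAG_UNESCAPE.get(two, value[i + 1]))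
--             i += 2
--             continue
--         out.append(value[i])
--         i += 1
--     return "".join(out)
-- ===== SOURCE B (Python) =====
-- _UNESCAPE_CHAR = {":": ";", "s": " ", "r": "\r", "n": "\n"}
--
--
-- def _unescape_tag_value(value: str) -> str:
--     # Staged algorithm: split on backslash once, then process the pieces.
--     # Each piece after the first begins right after a consumed backslash:
--     # a nonempty piece starts with the escaped char (map it, keep the rest);
--     # an empty piece means the separator was followed by another backslash
--     # ("\\\\" escape -> literal backslash), so emit "\\" and take the next
--     # piece verbatim; an empty piece at the very end is a lone trailing
--     # backslash, which is preserved.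
--     parts = value.split("\\")
--     out = [parts[0]]
--     i = 1
--     while i < len(parts):
--         p = parts[i]
--         if p:
--             out.append(_UNESCAPE_CHAR.get(p[0], p[0]) + p[1:])
--             i += 1
--         else:
--             out.append("\\")
--             i += 2
--             if i - 1 < len(parts):
--                 out.append(parts[i - 1])
--     return "".join(out)
-- ===== Notes on version B (the rewrite author's own statement) =====
-- stated objective: faster
-- what changed: Replaces A's char-by-char index loop with two-char slices and a slice-keyed dict by a staged algorithm: split the string on backslash once, then process the resulting pieces (map the first char of a nonempty piece; an empty piece encodes an escaped or lone trailing backslash) and join.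
import Mathlib
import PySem

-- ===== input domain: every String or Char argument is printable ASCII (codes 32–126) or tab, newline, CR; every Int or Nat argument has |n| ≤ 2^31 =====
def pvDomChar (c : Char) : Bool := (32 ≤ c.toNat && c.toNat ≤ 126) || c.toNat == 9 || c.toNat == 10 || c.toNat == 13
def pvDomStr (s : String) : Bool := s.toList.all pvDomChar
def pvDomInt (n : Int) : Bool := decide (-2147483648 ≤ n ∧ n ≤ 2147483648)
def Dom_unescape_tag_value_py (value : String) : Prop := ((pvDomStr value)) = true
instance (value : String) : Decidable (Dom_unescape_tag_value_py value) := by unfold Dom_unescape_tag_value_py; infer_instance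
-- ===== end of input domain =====

-- B replaces A's index loop (two-char slices, slice-keyed dict) by a staged algorithm:
-- split on backslash once, process the pieces, join; the return values agree (proved below).

-- ===== PORT A =====
-- _TAG_UNESCAPE, keyed by the two-char escape sequence
def pvTagUnescape : PySem.Dict String String :=
  PySem.Dict.mk [("\\:", ";"), ("\\s", " "), ("\\\\", "\\"), ("\\r", "\r"), ("\\n", "\n")]

-- the while loop: index i over the chars of value, accumulating `out`
def pvALoop (cs : List Char) (i : Nat) (out : List String) : List String :=
  if h : i < cs.length then
    if hb : cs[i] = '\\' ∧ i + 1 < cs.length then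
      -- two = value[i : i + 2]
      let two := String.ofList (PySem.List.slice cs (some (i : Int)) (some ((i : Int) + 2)))
      pvALoop cs (i + 2) (out ++ [PySem.Dict.getD pvTagUnescape two (String.ofList [cs[i + 1]])])
    else
      pvALoop cs (i + 1) (out ++ [String.ofList [cs[i]]])
  else out
termination_by cs.length - i

def unescape_tag_value_py (value : String) : String :=
  String.join (pvALoop value.toList 0 [])

-- ===== PORT B =====
-- _UNESCAPE_CHAR, keyed by the single char after a consumed backslash
def pvUnescChar : PySem.Dict Char Char :=
  PySem.Dict.mk [(':', ';'), ('s', ' '), ('r', '\r'), ('n', '\n')]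

-- the while loop over parts[1:]: a nonempty piece starts with the escaped char;
-- an empty piece is an escaped backslash (next piece taken verbatim) or, at the
-- very end, a lone trailing backslash
def pvBPieces : List (List Char) → List (List Char)
  | [] => []
  | (c :: cs) :: rest => (PySem.Dict.getD pvUnescChar c c :: cs) :: pvBPieces rest
  | [] :: [] => [['\\']]
  | [] :: q :: rest' => ['\\'] :: q :: pvBPieces rest'

def unescape_tag_value_py_alt (value : String) : String :=
  -- parts = value.split("\\"); out = [parts[0]] ++ processed pieces; "".join(out)
  match PySem.Chars.splitOn value.toList ['\\'] with
  | [] => ""                       -- unreachable: split always yields ≥ 1 piece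
  | p0 :: rest => String.ofList ((p0 :: pvBPieces rest).flatten)

-- ===== PRECONDITION & SPEC =====
def Spec_unescape_tag_value_py (value : String) (out : String) : Prop := out = unescape_tag_value_py_alt value
instance (value : String) (out : String) : Decidable (Spec_unescape_tag_value_py value out) := by unfold Spec_unescape_tag_value_py; infer_instance

-- ===== CLAIM (what is proved, stated in full; the proofs are below) =====
def Claim_equal_unescape_tag_value_py : Prop := ∀ (value : String), Dom_unescape_tag_value_py value → Spec_unescape_tag_value_py value (unescape_tag_value_py value)

-- ===== LEMMAS AND PROOFS =====

-- proof-only intermediate: the direct one-char-lookahead scan both programs compute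
def pvBScan : List Char → List Char
  | [] => []
  | ch :: rest =>
    if ch = '\\' then
      match rest with
      | [] => ['\\']
      | nxt :: rest' => PySem.Dict.getD pvUnescChar nxt nxt :: pvBScan rest'
    else ch :: pvBScan rest

-- A's two-char-keyed lookup agrees with the single-char-keyed lookup
lemma key_bridge (c : Char) :
    PySem.Dict.getD pvTagUnescape (String.ofList ['\\', c]) (String.ofList [c])
      = String.ofList [PySem.Dict.getD pvUnescChar c c] := by
  by_cases h1 : c = ':'
  · subst h1; rfl
  by_cases h2 : c = 's'
  · subst h2; rfl
  by_cases h3 : c = '\\'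
  · subst h3; rfl
  by_cases h4 : c = 'r'
  · subst h4; rfl
  by_cases h5 : c = 'n'
  · subst h5; rfl
  simp [pvTagUnescape, pvUnescChar, PySem.Dict.getD_eq_get?_getD,
    PySem.Dict.get?, String.ext_iff, Ne.symm h1, Ne.symm h2, Ne.symm h3, Ne.symm h4, Ne.symm h5]

lemma join_append_singleton (l : List String) (s : String) :
    String.join (l ++ [s]) = String.join l ++ s := by
  simp [String.join]

lemma aLoop_eq (cs : List Char) (i : Nat) (out : List String) :
    String.join (pvALoop cs i out)
      = String.join out ++ String.ofList (pvBScan (cs.drop i)) := by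
  fun_induction pvALoop cs i out with
  | case1 i out h hb two ih =>
      obtain ⟨hc, hlt⟩ := hb
      have hdrop1 : cs.drop (i + 1) = cs[i + 1] :: cs.drop (i + 2) :=
        List.drop_eq_getElem_cons hlt
      have hdrop : cs.drop i = cs[i] :: cs[i + 1] :: cs.drop (i + 2) := by
        rw [List.drop_eq_getElem_cons h, hdrop1]
      have htwo : two = String.ofList ['\\', cs[i + 1]] := by
        have hcast : ((i : Int) + 2) = ((i + 2 : Nat) : Int) := by push_cast; ring
        simp only [two, hcast, PySem.List.slice_natCast]
        have h2 : i + 2 - i = 2 := by omega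
        rw [h2, hdrop, hc, List.take_succ_cons, List.take_succ_cons, List.take_zero]
      have hscan : pvBScan (cs.drop i)
          = PySem.Dict.getD pvUnescChar cs[i + 1] cs[i + 1] :: pvBScan (cs.drop (i + 2)) := by
        rw [hdrop, hc]; rfl
      rw [ih, join_append_singleton, hscan, htwo, key_bridge, ← String.toList_inj]
      simp
  | case2 i out h hb ih =>
      have hscan : pvBScan (cs.drop i) = cs[i] :: pvBScan (cs.drop (i + 1)) := by
        by_cases hc : cs[i] = '\\'
        · have hnil : cs.drop (i + 1) = [] := by
            apply List.drop_eq_nil_of_le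
            rcases Nat.lt_or_ge (i + 1) cs.length with hl | hl
            · exact absurd ⟨hc, hl⟩ hb
            · exact hl
          rw [List.drop_eq_getElem_cons h, hnil, hc]; rfl
        · rw [List.drop_eq_getElem_cons h]
          rw [pvBScan.eq_def]
          dsimp only
          rw [if_neg hc]
      rw [ih, join_append_singleton, hscan, ← String.toList_inj]
      simp
  | case3 i out h =>
      rw [List.drop_eq_nil_of_le (by omega)]
      simp [pvBScan, String.join]

-- a clean recursive characterisation of splitting on a single backslash
def mySplit : List Char → List (List Char)
  | [] => [[]]
  | c :: cs =>
    if c = '\\' then [] :: mySplit cs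
    else
      match mySplit cs with
      | [] => [[c]]
      | h :: t => (c :: h) :: t

lemma mySplit_ne_nil (cs : List Char) : mySplit cs ≠ [] := by
  cases cs with
  | nil => simp [mySplit]
  | cons c cs =>
      rw [mySplit.eq_def]
      dsimp only
      split
      · simp
      · split <;> simp

def prependFirst (pre : List Char) : List (List Char) → List (List Char)
  | [] => [pre]
  | h :: t => (pre ++ h) :: t

lemma go_eq (l : List Char) :
    ∀ (fuel : Nat) (cur : List Char) (acc : List (List Char)), l.length < fuel →
      PySem.Chars.splitOn.go ['\\'] fuel l cur acc
        = acc.reverse ++ prependFirst cur.reverse (mySplit l) := by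
  induction l with
  | nil =>
      intro fuel cur acc hf
      obtain ⟨f, rfl⟩ : ∃ f, fuel = f + 1 := ⟨fuel - 1, by omega⟩
      simp [PySem.Chars.splitOn.go, mySplit, prependFirst]
  | cons c rest ih =>
      intro fuel cur acc hf
      obtain ⟨f, rfl⟩ : ∃ f, fuel = f + 1 := ⟨fuel - 1, by omega⟩
      have hrest : rest.length < f := by simpa using hf
      by_cases hc : c = '\\'
      · subst hc
        have hpre : List.isPrefixOf ['\\'] ('\\' :: rest) = true := by
          simp [List.isPrefixOf]
        rw [PySem.Chars.splitOn.go.eq_def]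
        simp only [hpre, if_pos]
        rw [List.length_singleton, List.drop_one, List.tail_cons,
          ih f [] (cur.reverse :: acc) hrest]
        obtain ⟨h, t, hht⟩ : ∃ h t, mySplit rest = h :: t := by
          cases hm : mySplit rest with
          | nil => exact absurd hm (mySplit_ne_nil rest)
          | cons h t => exact ⟨h, t, rfl⟩
        simp [mySplit, hht, prependFirst]
      · have hpre : List.isPrefixOf ['\\'] (c :: rest) = false := by
          simp [List.isPrefixOf, Ne.symm hc]
        rw [PySem.Chars.splitOn.go.eq_def]
        simp only [hpre, Bool.false_eq_true, if_false]
        rw [ih f (c :: cur) acc hrest]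
        obtain ⟨h, t, hht⟩ : ∃ h t, mySplit rest = h :: t := by
          cases hm : mySplit rest with
          | nil => exact absurd hm (mySplit_ne_nil rest)
          | cons h t => exact ⟨h, t, rfl⟩
        simp [mySplit, hc, hht, prependFirst]

lemma splitOn_eq (cs : List Char) : PySem.Chars.splitOn cs ['\\'] = mySplit cs := by
  unfold PySem.Chars.splitOn
  rw [go_eq cs (cs.length + 1) [] [] (by omega)]
  obtain ⟨h, t, hht⟩ : ∃ h t, mySplit cs = h :: t := by
    cases hm : mySplit cs with
    | nil => exact absurd hm (mySplit_ne_nil cs)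
    | cons h t => exact ⟨h, t, rfl⟩
  simp [hht, prependFirst]

def myJoin : List (List Char) → List Char
  | [] => []
  | p :: rest => p ++ (pvBPieces rest).flatten

lemma scan_eq_split : ∀ (n : Nat) (cs : List Char), cs.length ≤ n →
    pvBScan cs = myJoin (mySplit cs) := by
  intro n
  induction n with
  | zero =>
      intro cs h
      have h0 : cs = [] := List.length_eq_zero_iff.mp (Nat.le_zero.mp h)
      subst h0
      rfl
  | succ n ih =>
      intro cs hlen
      cases cs with
      | nil => rfl
      | cons c rest =>
        by_cases hc : c = '\\'
        · subst hc
          cases rest with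
          | nil => rfl
          | cons c2 rest2 =>
            have hlen2 : rest2.length ≤ n := by simp at hlen; omega
            by_cases hc2 : c2 = '\\'
            · subst hc2
              obtain ⟨h2, t2, hht⟩ : ∃ h t, mySplit rest2 = h :: t := by
                cases hm : mySplit rest2 with
                | nil => exact absurd hm (mySplit_ne_nil rest2)
                | cons h t => exact ⟨h, t, rfl⟩
              have ih2 := ih rest2 hlen2
              rw [hht] at ih2
              simp only [pvBScan, mySplit, hht, myJoin] at ih2 ⊢
              simp [ih2]
              rfl
            · obtain ⟨h2, t2, hht⟩ : ∃ h t, mySplit rest2 = h :: t := by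
                cases hm : mySplit rest2 with
                | nil => exact absurd hm (mySplit_ne_nil rest2)
                | cons h t => exact ⟨h, t, rfl⟩
              have ih2 := ih rest2 hlen2
              rw [hht] at ih2
              have hp : pvBPieces ((c2 :: h2) :: t2)
                  = (PySem.Dict.getD pvUnescChar c2 c2 :: h2) :: pvBPieces t2 := rfl
              have hm : mySplit ('\\' :: c2 :: rest2) = [] :: (c2 :: h2) :: t2 := by
                rw [mySplit.eq_def]
                dsimp only
                rw [if_pos rfl, mySplit.eq_def]
                dsimp only
                rw [if_neg hc2, hht]
              have hs : pvBScan ('\\' :: c2 :: rest2)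
                  = PySem.Dict.getD pvUnescChar c2 c2 :: pvBScan rest2 := rfl
              rw [hs, hm]
              simp [myJoin, hp, ih2]
        · have hlen1 : rest.length ≤ n := by simp at hlen; omega
          obtain ⟨h1, t1, hht⟩ : ∃ h t, mySplit rest = h :: t := by
            cases hm : mySplit rest with
            | nil => exact absurd hm (mySplit_ne_nil rest)
            | cons h t => exact ⟨h, t, rfl⟩
          have ih1 := ih rest hlen1
          rw [hht] at ih1
          have hs : pvBScan (c :: rest) = c :: pvBScan rest := by
            rw [pvBScan.eq_def]
            dsimp only
            rw [if_neg hc]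
          have hm : mySplit (c :: rest) = (c :: h1) :: t1 := by
            rw [mySplit.eq_def]
            dsimp only
            rw [if_neg hc, hht]
          rw [hs, hm]
          simp [myJoin, ih1]

-- ===== VERDICT (by name: the statement is the Claim_ definition above) =====
theorem unescape_tag_value_py_spec : Claim_equal_unescape_tag_value_py := by
  intro value _
  unfold Spec_unescape_tag_value_py unescape_tag_value_py unescape_tag_value_py_alt
  rw [aLoop_eq, splitOn_eq]
  obtain ⟨h, t, hht⟩ : ∃ h t, mySplit value.toList = h :: t := by
    cases hm : mySplit value.toList with
    | nil => exact absurd hm (mySplit_ne_nil value.toList)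
    | cons h t => exact ⟨h, t, rfl⟩
  rw [hht, List.drop_zero, scan_eq_split value.toList.length value.toList le_rfl, hht]
  simp [String.join, myJoin]
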